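-- pv_equiv track=rewrite | github.com/ChangHChen/python | Introduction to Python/final task/8.py | find_the_number
-- ===== SOURCE A (Python) =====
-- def find_the_number(num):
--     x = 1
--     while True:
--         if x < 21:
--             if num % x == 0:
--                 x += 1
--             else:
--                 break
--         else:
--             return "true"
-- ===== SOURCE B (Python) =====
-- def find_the_number(num):
--     # LCM(1..20) = 232792560: num is divisible by every integer 1..20
--     # exactly when it is divisible by their least common multiple.
--     if num % 232792560 == 0:
--         return "true"
-- ===== Notes on version B (the rewrite author's own statement) =====
-- stated objective: simpler
-- what changed: Replaces the per-divisor while-loop over 1..20 with a single remainder test against lcm(1..20) = 232792560, falling through to None otherwise.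
import Mathlib
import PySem

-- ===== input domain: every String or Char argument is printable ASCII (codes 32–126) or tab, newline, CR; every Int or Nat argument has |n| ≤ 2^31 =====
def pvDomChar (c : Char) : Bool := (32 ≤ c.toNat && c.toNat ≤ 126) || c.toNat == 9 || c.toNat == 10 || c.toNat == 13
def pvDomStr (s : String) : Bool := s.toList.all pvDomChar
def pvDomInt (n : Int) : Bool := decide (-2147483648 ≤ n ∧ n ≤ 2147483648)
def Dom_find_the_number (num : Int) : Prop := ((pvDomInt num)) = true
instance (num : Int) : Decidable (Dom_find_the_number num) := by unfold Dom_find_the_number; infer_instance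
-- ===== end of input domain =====

-- ===== PORT A =====
-- while True: if x < 21: (if num % x == 0: x += 1 else: break) else: return "true"
-- falling out of the loop via break returns None.
def findLoop (num : Int) (x : Int) : Option String :=
  if x < 21 then
    (if PySem.Int.mod num x = 0 then findLoop num (x + 1) else none)
  else some "true"
termination_by (21 - x).toNat
decreasing_by omega

def find_the_number (num : Int) : Option String := findLoop num 1

-- ===== PORT B =====
-- B: single remainder test against lcm(1..20) = 232792560; falls through to None.
def find_the_number_alt (num : Int) : Option String :=
  if PySem.Int.mod num 232792560 = 0 then some "true" else none

-- ===== PRECONDITION & SPEC =====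
def Spec_find_the_number (num : Int) (out : Option String) : Prop := out = find_the_number_alt num
instance (num : Int) (out : Option String) : Decidable (Spec_find_the_number num out) := by unfold Spec_find_the_number; infer_instance

-- ===== CLAIM (what is proved, stated in full; the proofs are below) =====
def Claim_equal_find_the_number : Prop := ∀ (num : Int), Dom_find_the_number num → Spec_find_the_number num (find_the_number num)

-- ===== LEMMAS AND PROOFS =====
-- ===== VERDICT (by name: the statement is the Claim_ definition above) =====
-- every k with 1 ≤ k < 21 divides num iff lcm(1..20) = 232792560 divides num
lemma all_dvd_iff_lcm_dvd (num : Int) :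
    (∀ k : Int, 1 ≤ k → k < 21 → k ∣ num) ↔ (232792560 : Int) ∣ num := by
  constructor
  · intro h
    have h16 := h 16 (by norm_num) (by norm_num)
    have h9 := h 9 (by norm_num) (by norm_num)
    have h5 := h 5 (by norm_num) (by norm_num)
    have h7 := h 7 (by norm_num) (by norm_num)
    have h11 := h 11 (by norm_num) (by norm_num)
    have h13 := h 13 (by norm_num) (by norm_num)
    have h17 := h 17 (by norm_num) (by norm_num)
    have h19 := h 19 (by norm_num) (by norm_num)
    have c1 : IsCoprime (16 : Int) 9 := by rw [Int.isCoprime_iff_gcd_eq_one]; decide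
    have d1 : (144 : Int) ∣ num := by have := c1.mul_dvd h16 h9; norm_num at this; exact this
    have c2 : IsCoprime (144 : Int) 5 := by rw [Int.isCoprime_iff_gcd_eq_one]; decide
    have d2 : (720 : Int) ∣ num := by have := c2.mul_dvd d1 h5; norm_num at this; exact this
    have c3 : IsCoprime (720 : Int) 7 := by rw [Int.isCoprime_iff_gcd_eq_one]; decide
    have d3 : (5040 : Int) ∣ num := by have := c3.mul_dvd d2 h7; norm_num at this; exact this
    have c4 : IsCoprime (5040 : Int) 11 := by rw [Int.isCoprime_iff_gcd_eq_one]; decide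
    have d4 : (55440 : Int) ∣ num := by have := c4.mul_dvd d3 h11; norm_num at this; exact this
    have c5 : IsCoprime (55440 : Int) 13 := by rw [Int.isCoprime_iff_gcd_eq_one]; decide
    have d5 : (720720 : Int) ∣ num := by have := c5.mul_dvd d4 h13; norm_num at this; exact this
    have c6 : IsCoprime (720720 : Int) 17 := by rw [Int.isCoprime_iff_gcd_eq_one]; decide
    have d6 : (12252240 : Int) ∣ num := by have := c6.mul_dvd d5 h17; norm_num at this; exact this
    have c7 : IsCoprime (12252240 : Int) 19 := by rw [Int.isCoprime_iff_gcd_eq_one]; decide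
    have d7 := c7.mul_dvd d6 h19
    norm_num at d7; exact d7
  · intro h k hk1 hk21
    refine dvd_trans ?_ h
    interval_cases k <;> decide

lemma findLoop_some (num : Int) : ∀ n : Nat, ∀ x : Int, x + n = 21 → 1 ≤ x →
    (∀ k : Int, x ≤ k → k < 21 → k ∣ num) → findLoop num x = some "true" := by
  intro n
  induction n with
  | zero =>
      intro x hx _ _
      rw [findLoop]
      simp only [Nat.cast_zero, add_zero] at hx
      simp [hx]
  | succ m ih =>
      intro x hx hx1 h
      have hlt : x < 21 := by push_cast at hx ⊢; omega
      have hdvd : x ∣ num := h x le_rfl hlt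
      rw [findLoop]
      rw [if_pos hlt, if_pos ((PySem.Int.mod_eq_zero_iff_dvd num x).mpr hdvd)]
      exact ih (x + 1) (by push_cast at hx ⊢; omega) (by omega)
        (fun k hk hk' => h k (by omega) hk')

lemma findLoop_none (num : Int) : ∀ n : Nat, ∀ x : Int, x + n = 21 → 1 ≤ x →
    (¬ ∀ k : Int, x ≤ k → k < 21 → k ∣ num) → findLoop num x = none := by
  intro n
  induction n with
  | zero =>
      intro x hx _ h
      exfalso; apply h; intro k hk hk'
      simp only [Nat.cast_zero, add_zero] at hx; omega
  | succ m ih =>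
      intro x hx hx1 h
      have hlt : x < 21 := by push_cast at hx ⊢; omega
      rw [findLoop, if_pos hlt]
      by_cases hd : x ∣ num
      · rw [if_pos ((PySem.Int.mod_eq_zero_iff_dvd num x).mpr hd)]
        refine ih (x + 1) (by push_cast at hx ⊢; omega) (by omega) ?_
        intro hall
        apply h; intro k hk hk'
        rcases eq_or_lt_of_le hk with rfl | hk2
        · exact hd
        · exact hall k (by omega) hk'
      · rw [if_neg (fun hc => hd ((PySem.Int.mod_eq_zero_iff_dvd num x).mp hc))]

-- ===== VERDICT (by name: the statement is the Claim_ definition above) =====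
theorem find_the_number_spec : Claim_equal_find_the_number := by
  intro num _
  unfold Spec_find_the_number find_the_number find_the_number_alt
  by_cases h : (232792560 : Int) ∣ num
  · rw [if_pos ((PySem.Int.mod_eq_zero_iff_dvd num 232792560).mpr h)]
    exact findLoop_some num 20 1 (by norm_num) le_rfl
      (fun k hk hk' => ((all_dvd_iff_lcm_dvd num).mpr h) k hk hk')
  · rw [if_neg (fun hc => h ((PySem.Int.mod_eq_zero_iff_dvd num 232792560).mp hc))]
    exact findLoop_none num 20 1 (by norm_num) le_rfl
      (fun hall => h ((all_dvd_iff_lcm_dvd num).mp hall))
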